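-- pv_equiv track=rewrite | github.com/pmtam0403-gif/bidirectional-eon-main | src/rsa/NewRSA.py | select_disjoint_sets
-- ===== SOURCE A (Python) =====
-- from typing import List, Dict, Tuple, Optional, Set
-- from functools import lru_cache
--
-- def select_disjoint_sets(groups: List[List[List[int]]]) -> List[List[int]]:
--     @lru_cache(maxsize=None)
--     def backtrack(index: int, used: frozenset) -> Optional[Tuple[List[int], ...]]:
--         if index == len(groups):
--             return ()
--         for candidate in groups[index]:
--             s = set(candidate)
--             if s & used:
--                 continue
--             result = backtrack(index + 1, used | s)
--             if result is not None:
--                 return (tuple(candidate),) + result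
--         return None
--
--     result = backtrack(0, frozenset())
--     return [list(r) for r in result] if result else []
-- ===== SOURCE B (Python) =====
-- def select_disjoint_sets(groups):
--     if not groups:
--         return []
--     # iterative DFS; frame = (remaining candidates at this depth,
--     #                         used set before this depth, groups below this depth)
--     stack = [(list(groups[0]), frozenset(), groups[1:])]
--     chosen = []
--     while stack:
--         cands, used, below = stack[-1]
--         if not cands:
--             stack.pop()
--             if chosen:
--                 chosen.pop()
--             continue
--         c = cands[0]
--         stack[-1] = (cands[1:], used, below)
--         s = set(c)
--         if s & used:
--             continue
--         chosen.append(list(c))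
--         if not below:
--             return chosen
--         stack.append((list(below[0]), used | s, below[1:]))
--     return []
-- ===== Notes on version B (the rewrite author's own statement) =====
-- stated objective: alternative
-- what changed: Replaces A's recursive (lru_cache-memoised) backtracking with an explicit iterative DFS over a manual stack of frames (remaining candidates, accumulated used set, remaining groups), popping on exhaustion and returning the first complete assignment.
import Mathlib
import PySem

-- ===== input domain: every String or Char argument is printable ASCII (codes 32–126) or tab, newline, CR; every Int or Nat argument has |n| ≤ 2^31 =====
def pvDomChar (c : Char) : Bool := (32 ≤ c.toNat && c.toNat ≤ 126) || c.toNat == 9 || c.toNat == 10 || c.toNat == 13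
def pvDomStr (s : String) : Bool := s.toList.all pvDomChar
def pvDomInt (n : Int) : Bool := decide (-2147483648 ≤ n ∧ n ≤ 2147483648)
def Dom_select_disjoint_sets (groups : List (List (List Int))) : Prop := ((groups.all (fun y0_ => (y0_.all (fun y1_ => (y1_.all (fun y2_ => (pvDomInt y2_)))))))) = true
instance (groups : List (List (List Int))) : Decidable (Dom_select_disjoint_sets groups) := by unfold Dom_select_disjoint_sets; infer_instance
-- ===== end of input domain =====

-- B replaces A's recursive (memoised) backtracking with an explicit iterative DFS over a
-- manual stack of frames (remaining candidates, used set, remaining groups); same results.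

-- ===== PORT A =====
-- A's backtrack(index, used): recursion on the suffix groups[index:]; the for-loop over
-- groups[index] is tryA.  (A's lru_cache memoisation does not change the computed value.)
mutual
def btA : List (List (List Int)) → PySem.Set Int → Option (List (List Int))
  | [], _ => some []
  | g :: gs, used => tryA g gs used
  termination_by gs _ => (gs.length, 0, 0)
def tryA : List (List Int) → List (List (List Int)) → PySem.Set Int → Option (List (List Int))
  | [], _, _ => none
  | c :: cs, gs, used =>
    let s := PySem.Set.ofList c
    if !(PySem.Set.inter s used).isEmpty then tryA cs gs used
    else
      match btA gs (PySem.Set.union used s) with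
      | some r => some (c :: r)
      | none => tryA cs gs used
  termination_by cs gs _ => (gs.length, 1, cs.length)
end

def select_disjoint_sets (groups : List (List (List Int))) : List (List Int) :=
  match btA groups PySem.Set.empty with
  | some res => if res.isEmpty then [] else res.map (fun r => r)
  | none => []

-- ===== PORT B =====
-- weight of the groups still below a frame (termination measure helper for the DFS loop)
def pwB : List (List (List Int)) → Nat
  | [] => 1
  | g :: bs => (g.length + 2) * pwB bs

theorem pwB_pos : ∀ bs, 1 ≤ pwB bs
  | [] => le_refl 1
  | g :: bs => le_trans (pwB_pos bs) (Nat.le_mul_of_pos_left _ (by omega))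

def muB : List (List (List Int) × PySem.Set Int × List (List (List Int))) → Nat
  | [] => 0
  | (cands, _, below) :: rest => cands.length * pwB below + 1 + muB rest

-- the while-loop: frame = (remaining candidates, used before this depth, groups below)
def loopB (stack : List (List (List Int) × PySem.Set Int × List (List (List Int))))
    (chosen : List (List Int)) : List (List Int) :=
  match stack with
  | [] => []
  | (cands, used, below) :: rest =>
    match cands with
    | [] => loopB rest (if chosen.isEmpty then chosen else chosen.dropLast)
    | c :: cs =>
      let s := PySem.Set.ofList c
      if !(PySem.Set.inter s used).isEmpty then loopB ((cs, used, below) :: rest) chosen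
      else
        let chosen' := chosen ++ [c]
        match below with
        | [] => chosen'
        | g :: below' =>
          loopB ((g, PySem.Set.union used s, below') :: (cs, used, g :: below') :: rest) chosen'
termination_by muB stack
decreasing_by
  · simp only [muB]; omega
  · simp only [muB, List.length_cons, Nat.succ_mul]; have := pwB_pos below; omega
  · simp only [muB, pwB, List.length_cons, Nat.succ_mul, Nat.mul_add]; have := pwB_pos below'; omega

def select_disjoint_sets_alt (groups : List (List (List Int))) : List (List Int) :=
  match groups with
  | [] => []
  | g :: gs => loopB [(g, PySem.Set.empty, gs)] []

-- ===== PRECONDITION & SPEC =====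
def Spec_select_disjoint_sets (groups : List (List (List Int))) (out : List (List Int)) : Prop := out = select_disjoint_sets_alt groups
instance (groups : List (List (List Int))) (out : List (List Int)) : Decidable (Spec_select_disjoint_sets groups out) := by unfold Spec_select_disjoint_sets; infer_instance

-- ===== CLAIM (what is proved, stated in full; the proofs are below) =====
def Claim_equal_select_disjoint_sets : Prop := ∀ (groups : List (List (List Int))), Dom_select_disjoint_sets groups → Spec_select_disjoint_sets groups (select_disjoint_sets groups)

-- ===== LEMMAS AND PROOFS =====

-- a successful tryA always returns the chosen candidate consed on, hence never []
theorem tryA_ne_nil : ∀ (cands : List (List Int)) (gs : List (List (List Int)))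
    (used : PySem.Set Int) (r : List (List Int)), tryA cands gs used = some r → r ≠ [] := by
  intro cands
  induction cands with
  | nil => intro gs used r h; rw [tryA] at h; exact absurd h (by simp)
  | cons c cs ih =>
    intro gs used r h
    rw [tryA] at h
    split at h
    · exact ih gs used r h
    · split at h
      · simp only [Option.some.injEq] at h; simp [← h]
      · exact ih gs used r h

-- the DFS loop on a nonempty stack computes: run A's per-group search (tryA) on the top
-- frame; on success append its solution to `chosen`, on failure pop frame and last choice
theorem loopB_eq : ∀ (n : Nat) (cands : List (List Int)) (used : PySem.Set Int)
    (below : List (List (List Int)))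
    (rest : List (List (List Int) × PySem.Set Int × List (List (List Int))))
    (chosen : List (List Int)), muB ((cands, used, below) :: rest) ≤ n →
    loopB ((cands, used, below) :: rest) chosen =
      match tryA cands below used with
      | some r => chosen ++ r
      | none => loopB rest (if chosen.isEmpty then chosen else chosen.dropLast) := by
  intro n
  induction n with
  | zero => intro cands used below rest chosen hμ; simp only [muB] at hμ; omega
  | succ n ih =>
    intro cands used below rest chosen hμ
    cases cands with
    | nil => rw [loopB, tryA]
    | cons c cs =>
      rw [loopB, tryA]
      by_cases hi : (!(PySem.Set.inter (PySem.Set.ofList c) used).isEmpty) = true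
      · rw [if_pos hi, if_pos hi]
        exact ih cs used below rest chosen
          (by simp only [muB, List.length_cons, Nat.succ_mul] at hμ ⊢
              have := pwB_pos below; omega)
      · rw [if_neg hi, if_neg hi]
        cases below with
        | nil => rw [btA]
        | cons g below' =>
          rw [btA]
          simp only []
          rw [ih g (PySem.Set.union used (PySem.Set.ofList c)) below'
                ((cs, used, g :: below') :: rest) (chosen ++ [c])
              (by simp only [muB, pwB, List.length_cons, Nat.succ_mul, Nat.mul_add] at hμ ⊢
                  have := pwB_pos below'; omega)]
          cases htry : tryA g below' (PySem.Set.union used (PySem.Set.ofList c)) with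
          | some r => simp
          | none =>
            simp only []
            rw [ih cs used (g :: below') rest
                (if (chosen ++ [c]).isEmpty then chosen ++ [c] else (chosen ++ [c]).dropLast)
                (by simp only [muB, pwB, List.length_cons, Nat.succ_mul, Nat.mul_add] at hμ ⊢
                    have := pwB_pos below'; omega)]
            cases h2 : tryA cs (g :: below') used <;> simp

-- ===== VERDICT (by name: the statement is the Claim_ definition above) =====
theorem select_disjoint_sets_spec : Claim_equal_select_disjoint_sets := by
  intro groups _
  unfold Spec_select_disjoint_sets
  cases groups with
  | nil => simp [select_disjoint_sets, select_disjoint_sets_alt, btA]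
  | cons g gs =>
    simp only [select_disjoint_sets, select_disjoint_sets_alt, btA]
    rw [loopB_eq (muB [(g, PySem.Set.empty, gs)]) g PySem.Set.empty gs [] [] (le_refl _)]
    cases h : tryA g gs PySem.Set.empty with
    | some r =>
      have hne := tryA_ne_nil g gs PySem.Set.empty r h
      simp [List.isEmpty_iff, hne]
    | none => simp [loopB]
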